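-- pv_equiv track=rewrite | github.com/TomasRacil/Python | Projekty/VyrokoveTabulky/formule.py | Pocet
-- ===== SOURCE A (Python) =====
-- def Pocet(s):
--     p = 0
--     q = 0
--     r = 0
--     for znak in s:
--         if znak == "p":
--             p = 1
--         elif znak == "q":
--             q = 1
--         elif znak == "r":
--             r = 1
--     return p + q + r
-- ===== SOURCE B (Python) =====
-- def Pocet(s):
--     return sum(1 for c in "pqr" if c in s)
-- ===== Notes on version B (the rewrite author's own statement) =====
-- stated objective: idiomatic
-- what changed: Replaces the per-character flag-tracking loop over the whole input with a sum over the three target variable characters, each tested for membership in the input string.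
import Mathlib
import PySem

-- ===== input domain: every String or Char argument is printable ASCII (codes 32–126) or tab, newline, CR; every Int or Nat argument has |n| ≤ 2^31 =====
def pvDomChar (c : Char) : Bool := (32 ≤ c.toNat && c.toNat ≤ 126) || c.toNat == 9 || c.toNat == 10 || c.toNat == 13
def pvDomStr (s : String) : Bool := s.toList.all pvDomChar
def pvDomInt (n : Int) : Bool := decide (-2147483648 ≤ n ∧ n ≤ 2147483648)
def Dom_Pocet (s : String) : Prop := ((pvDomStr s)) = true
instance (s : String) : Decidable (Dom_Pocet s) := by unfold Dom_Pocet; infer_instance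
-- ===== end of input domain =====

-- B replaces A's per-character flag loop with a sum over the three targets 'p','q','r' of a membership test (idiomatic).

-- ===== PORT A =====
-- A: one pass over s maintaining three 0/1 flags, returned summed.
def pocetStep (st : Int × Int × Int) (znak : Char) : Int × Int × Int :=
  if znak = 'p' then (1, st.2.1, st.2.2)
  else if znak = 'q' then (st.1, 1, st.2.2)
  else if znak = 'r' then (st.1, st.2.1, 1)
  else st

def Pocet (s : String) : Int :=
  let st := s.toList.foldl pocetStep (0, 0, 0)
  st.1 + st.2.1 + st.2.2

-- ===== PORT B =====
-- B: sum over the characters of "pqr" of 1 when the character occurs in s ('c in s' on a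
-- single character is exactly list membership of that character).
def Pocet_alt (s : String) : Int :=
  (("pqr".toList.filter (fun c => c ∈ s.toList)).map (fun _ => (1 : Int))).sum

-- ===== PRECONDITION & SPEC =====
def Spec_Pocet (s : String) (out : Int) : Prop := out = Pocet_alt s
instance (s : String) (out : Int) : Decidable (Spec_Pocet s out) := by unfold Spec_Pocet; infer_instance

-- ===== CLAIM (what is proved, stated in full; the proofs are below) =====
def Claim_equal_Pocet : Prop := ∀ (s : String), Dom_Pocet s → Spec_Pocet s (Pocet s)

-- ===== LEMMAS AND PROOFS =====
theorem pocet_foldl (l : List Char) (p q r : Int) :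
    l.foldl pocetStep (p, q, r) =
      ((if 'p' ∈ l then 1 else p), (if 'q' ∈ l then 1 else q), (if 'r' ∈ l then 1 else r)) := by
  induction l generalizing p q r with
  | nil => simp
  | cons c t ih =>
    simp only [List.foldl_cons, pocetStep, List.mem_cons]
    split_ifs with h1 h2 h3 <;> subst_vars <;> rw [ih] <;> simp_all <;> tauto

-- ===== VERDICT (by name: the statement is the Claim_ definition above) =====
theorem Pocet_spec : Claim_equal_Pocet := by
  intro s _
  unfold Spec_Pocet Pocet Pocet_alt
  rw [pocet_foldl]
  by_cases hp : 'p' ∈ s.toList <;> by_cases hq : 'q' ∈ s.toList <;> by_cases hr : 'r' ∈ s.toList <;>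
    simp [hp, hq, hr]
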